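-- pv_equiv track=rewrite | github.com/ElizaKnapp/machine_week | detect.py | _is_valid_human_move
-- ===== SOURCE A (Python) =====
-- def _is_valid_human_move(new_board, prev_board):
--     """Returns True iff exactly 1 new O was placed in a previously empty cell
--     and no existing mark was changed or removed."""
--     new_os = 0
--     for r in range(3):
--         for c in range(3):
--             old, new = prev_board[r][c], new_board[r][c]
--             if old != "." and new != old:
--                 return False        # existing mark changed or removed
--             if old == "." and new == "O":
--                 new_os += 1
--             elif old == "." and new == "X":
--                 return False        # unexpected robot mark appeared
--     return new_os == 1
-- ===== SOURCE B (Python) =====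
-- def _is_valid_human_move(new_board, prev_board):
--     """Returns True iff exactly 1 new O was placed in a previously empty cell
--     and no existing mark was changed or removed."""
--     # Histogram of cell transitions over the common 3x3 region, then judge the
--     # (at most 9) distinct transition TYPES instead of walking cells with guards.
--     tally = {}
--     for prow, nrow in zip(prev_board[:3], new_board[:3]):
--         for pair in zip(prow[:3], nrow[:3]):
--             tally[pair] = tally.get(pair, 0) + 1
--     if any((o != "." and n != o) or (o == "." and n == "X") for o, n in tally):
--         return False
--     return tally.get((".", "O"), 0) == 1
-- ===== Notes on version B (the rewrite author's own statement) =====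
-- stated objective: alternative
-- what changed: B builds a histogram (dict) of (old,new) cell transitions over the common 3x3 region in one tallying pass, then decides validity by classifying the distinct transition types and looking up the ('.','O') tally, instead of A's fused per-cell scan with an early-return guard cascade and a running counter.
import Mathlib
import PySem

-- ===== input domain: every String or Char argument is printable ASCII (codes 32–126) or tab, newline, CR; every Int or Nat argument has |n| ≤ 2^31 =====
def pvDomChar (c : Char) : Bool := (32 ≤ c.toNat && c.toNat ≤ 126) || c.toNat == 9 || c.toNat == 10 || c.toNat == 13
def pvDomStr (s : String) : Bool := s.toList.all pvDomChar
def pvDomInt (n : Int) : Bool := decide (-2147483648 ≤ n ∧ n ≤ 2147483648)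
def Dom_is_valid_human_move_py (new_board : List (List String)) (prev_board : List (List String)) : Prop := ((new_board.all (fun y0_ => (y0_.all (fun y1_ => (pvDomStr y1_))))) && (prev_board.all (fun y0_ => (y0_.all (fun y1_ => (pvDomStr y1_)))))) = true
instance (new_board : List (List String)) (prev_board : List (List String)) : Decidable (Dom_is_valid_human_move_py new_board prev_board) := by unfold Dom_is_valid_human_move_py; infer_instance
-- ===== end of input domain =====

-- B replaces A's fused per-cell guard cascade + running counter by a histogram (dict) of
-- (old, new) cell transitions over the common 3x3 region, judged by transition type (same cost).

-- cell lookup b[r][c] as A performs it; inside Pre_ every access A performs is in range, defaults unused there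
def pvCell (b : List (List String)) (r c : Int) : String :=
  (PySem.List.pyGet? ((PySem.List.pyGet? b r).getD []) c).getD ""

-- ===== PORT A =====
-- inner 'for c in range(3)' loop; Option Int = the running new_os count, none = early 'return False'
def pvAInner (new_board prev_board : List (List String)) (r : Int) (cs : List Int) (new_os : Int) : Option Int :=
  match cs with
  | [] => some new_os
  | c :: rest =>
    let old := pvCell prev_board r c
    let nw := pvCell new_board r c
    if old ≠ "." ∧ nw ≠ old then none
    else if old = "." ∧ nw = "O" then pvAInner new_board prev_board r rest (new_os + 1)
    else if old = "." ∧ nw = "X" then none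
    else pvAInner new_board prev_board r rest new_os

-- outer 'for r in range(3)' loop
def pvAOuter (new_board prev_board : List (List String)) (rs : List Int) (new_os : Int) : Option Int :=
  match rs with
  | [] => some new_os
  | r :: rest =>
    match pvAInner new_board prev_board r (PySem.List.pyRange 0 3 1) new_os with
    | none => none
    | some k => pvAOuter new_board prev_board rest k

def is_valid_human_move_py (new_board : List (List String)) (prev_board : List (List String)) : Bool :=
  match pvAOuter new_board prev_board (PySem.List.pyRange 0 3 1) 0 with
  | none => false
  | some k => decide (k = 1)

-- ===== PORT B =====
-- the tallying pass: tally[pair] = tally.get(pair, 0) + 1 over the nested zip loops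
def pvTally (new_board prev_board : List (List String)) : PySem.Dict (String × String) Int :=
  ((PySem.List.slice prev_board none (some 3)).zip (PySem.List.slice new_board none (some 3))).foldl
    (fun d rw =>
      ((PySem.List.slice rw.1 none (some 3)).zip (PySem.List.slice rw.2 none (some 3))).foldl
        (fun d p => d.insert p (d.getD p 0 + 1)) d)
    PySem.Dict.empty

def is_valid_human_move_py_alt (new_board : List (List String)) (prev_board : List (List String)) : Bool :=
  let tally := pvTally new_board prev_board
  -- 'for o, n in tally' iterates the dict's keys
  if tally.keys.any (fun p => (p.1 != "." && p.2 != p.1) || (p.1 == "." && p.2 == "X")) then false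
  else decide (tally.getD (".", "O") 0 = 1)

-- ===== PRECONDITION & SPEC =====
-- A scans the 9 cells in row-major order and raises IndexError at the first cell missing from either
-- board unless it has already hit an illegal change (which makes it return False early); Pre_ is
-- exactly that domain: either all 9 cells exist in both boards, or some cell with a readable prefix
-- shows an illegal change.
def pvViol (p : String × String) : Bool := (p.1 != "." && p.2 != p.1) || (p.1 == "." && p.2 == "X")

def pvIdx9 : List (Nat × Nat) := [(0,0),(0,1),(0,2),(1,0),(1,1),(1,2),(2,0),(2,1),(2,2)]

-- cell (r,c) exists in board b
def pvReadN (b : List (List String)) (rc : Nat × Nat) : Bool := ((b.getD rc.1 [])[rc.2]?).isSome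

-- (old, new) at cell (r,c) (default "" only outside the readable region)
def pvPairAt (new_board prev_board : List (List String)) (rc : Nat × Nat) : String × String :=
  ((prev_board.getD rc.1 []).getD rc.2 "", (new_board.getD rc.1 []).getD rc.2 "")

def Pre_is_valid_human_move_py (new_board : List (List String)) (prev_board : List (List String)) : Prop :=
  (∀ rc ∈ pvIdx9, pvReadN new_board rc = true ∧ pvReadN prev_board rc = true) ∨
  (∃ i ∈ List.range 9,
     (∀ j ∈ List.range 9, j ≤ i →
        pvReadN new_board (pvIdx9.getD j (0,0)) = true ∧ pvReadN prev_board (pvIdx9.getD j (0,0)) = true) ∧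
     pvViol (pvPairAt new_board prev_board (pvIdx9.getD i (0,0))) = true)
instance (new_board : List (List String)) (prev_board : List (List String)) : Decidable (Pre_is_valid_human_move_py new_board prev_board) := by unfold Pre_is_valid_human_move_py; infer_instance

def pvWitness_is_valid_human_move_py : List (List String) × List (List String) :=
  ([["O", ".", "."], [".", "X", "."], [".", ".", "."]],
   [[".", ".", "."], [".", "X", "."], [".", ".", "."]])

def Spec_is_valid_human_move_py (new_board : List (List String)) (prev_board : List (List String)) (out : Bool) : Prop := out = is_valid_human_move_py_alt new_board prev_board
instance (new_board : List (List String)) (prev_board : List (List String)) (out : Bool) : Decidable (Spec_is_valid_human_move_py new_board prev_board out) := by unfold Spec_is_valid_human_move_py; infer_instance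

-- ===== CLAIM (what is proved, stated in full; the proofs are below) =====
def Claim_equal_is_valid_human_move_py : Prop := ∀ (new_board : List (List String)) (prev_board : List (List String)), Dom_is_valid_human_move_py new_board prev_board → Pre_is_valid_human_move_py new_board prev_board → Spec_is_valid_human_move_py new_board prev_board (is_valid_human_move_py new_board prev_board)

-- ===== LEMMAS AND PROOFS =====

-- proof-side view of A's loop body acting on a list of (old, new) cell pairs
def pvFoldA : List (String × String) → Int → Option Int
  | [], k => some k
  | p :: rest, k =>
    if p.1 ≠ "." ∧ p.2 ≠ p.1 then none
    else if p.1 = "." ∧ p.2 = "O" then pvFoldA rest (k + 1)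
    else if p.1 = "." ∧ p.2 = "X" then none
    else pvFoldA rest k

lemma pvRange3 : PySem.List.pyRange 0 3 1 = [0, 1, 2] := by decide

-- the 9 cells in A's traversal order
def pvL (new_board prev_board : List (List String)) : List (String × String) :=
  ([0, 1, 2] : List Int).flatMap (fun r =>
    ([0, 1, 2] : List Int).map (fun c => (pvCell prev_board r c, pvCell new_board r c)))

-- the cells B tallies (common sliced 3x3 region), in B's traversal order
def pvZ (new_board prev_board : List (List String)) : List (String × String) :=
  ((prev_board.take 3).zip (new_board.take 3)).flatMap (fun rw => (rw.1.take 3).zip (rw.2.take 3))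

lemma pvAInner_eq (nb pb : List (List String)) (r : Int) :
    ∀ (cs : List Int) (k : Int),
      pvAInner nb pb r cs k = pvFoldA (cs.map (fun c => (pvCell pb r c, pvCell nb r c))) k := by
  intro cs
  induction cs with
  | nil => intro k; rfl
  | cons c rest ih =>
    intro k
    simp only [pvAInner, pvFoldA, List.map_cons]
    split_ifs <;> simp [ih]

lemma pvFoldA_append : ∀ (L1 L2 : List (String × String)) (k : Int),
    pvFoldA (L1 ++ L2) k = match pvFoldA L1 k with | none => none | some j => pvFoldA L2 j := by
  intro L1
  induction L1 with
  | nil => intro L2 k; rfl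
  | cons p rest ih =>
    intro L2 k
    simp only [List.cons_append, pvFoldA]
    split_ifs <;> simp [ih]

lemma pvAOuter_eq (nb pb : List (List String)) :
    ∀ (rs : List Int) (k : Int),
      pvAOuter nb pb rs k =
        pvFoldA (rs.flatMap (fun r => ([0,1,2] : List Int).map (fun c => (pvCell pb r c, pvCell nb r c)))) k := by
  intro rs
  induction rs with
  | nil => intro k; rfl
  | cons r rest ih =>
    intro k
    simp only [pvAOuter, pvRange3, List.flatMap_cons, pvAInner_eq, pvFoldA_append]
    cases pvFoldA (([0,1,2] : List Int).map (fun c => (pvCell pb r c, pvCell nb r c))) k with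
    | none => rfl
    | some j => simp [ih]

lemma pvFoldA_spec : ∀ (L : List (String × String)) (k : Int),
    pvFoldA L k = if L.any pvViol then none else some (k + (L.count (".", "O") : Int)) := by
  intro L
  induction L with
  | nil => intro k; simp [pvFoldA]
  | cons p rest ih =>
    intro k
    simp only [pvFoldA, List.any_cons, List.count_cons]
    by_cases h1 : p.1 ≠ "." ∧ p.2 ≠ p.1
    · have hv : pvViol p = true := by
        simp [pvViol]; exact Or.inl ⟨h1.1, h1.2⟩
      rw [if_pos h1, hv]
      simp
    · by_cases h2 : p.1 = "." ∧ p.2 = "O"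
      · have hv : pvViol p = false := by simp [pvViol, h2.1, h2.2]
        have hp : p = (".", "O") := Prod.ext h2.1 h2.2
        rw [if_neg h1, if_pos h2, ih, hv, hp]
        simp only [Bool.false_or, BEq.rfl]
        split <;> simp <;> omega
      · by_cases h3 : p.1 = "." ∧ p.2 = "X"
        · have hv : pvViol p = true := by simp [pvViol, h3.1, h3.2]
          rw [if_neg h1, if_neg h2, if_pos h3, hv]
          simp
        · have hv : pvViol p = false := by
            by_cases h : p.1 = "."
            · have hx : p.2 ≠ "X" := fun hX => h3 ⟨h, hX⟩
              simp [pvViol, h, hx]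
            · have he : p.2 = p.1 := by
                by_contra hne; exact h1 ⟨h, hne⟩
              simp [pvViol, h, he]
          have hc : (p == ((".", "O") : String × String)) = false := by
            apply beq_eq_false_iff_ne.mpr
            intro he
            exact h2 ⟨by rw [he], by rw [he]⟩
          rw [if_neg h1, if_neg h2, if_neg h3, ih, hv, hc, Bool.false_or]
          norm_num

lemma pvSlice3 {α : Type} (xs : List α) : PySem.List.slice xs none (some 3) = xs.take 3 := by
  have : ((3:Nat) : Int) = (3 : Int) := by norm_num
  rw [← this, PySem.List.slice_to_natCast]

-- a nested foldl over a flatMap decomposition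
lemma pvFoldl_flatMap {α β γ : Type} (l : List α) (f : α → List β) (g : γ → β → γ) :
    ∀ init, (l.flatMap f).foldl g init = l.foldl (fun acc x => (f x).foldl g acc) init := by
  induction l with
  | nil => intro init; rfl
  | cons x rest ih => intro init; simp only [List.flatMap_cons, List.foldl_append, List.foldl_cons, ih]

-- B's tally is the transition counter of the common region
lemma pvTally_eq (nb pb : List (List String)) :
    pvTally nb pb = PySem.Dict.counter (pvZ nb pb) := by
  simp only [pvTally, pvSlice3, ← pvFoldl_flatMap]
  rw [← pvZ]
  exact PySem.Dict.foldl_insert_getD_add_one_eq_counter _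

-- any over the deduplicated keys equals any over the list
lemma pvAny_ofList {α : Type} [BEq α] [LawfulBEq α] (l : List α) (f : α → Bool) :
    (PySem.Set.ofList l).any f = l.any f := by
  cases h : l.any f with
  | true =>
    obtain ⟨x, hx, hfx⟩ := List.any_eq_true.mp h
    exact List.any_eq_true.mpr ⟨x, (PySem.Set.mem_ofList l x).mpr hx, hfx⟩
  | false =>
    apply List.any_eq_false.mpr
    intro x hx
    exact List.any_eq_false.mp h x ((PySem.Set.mem_ofList l x).mp hx)

-- B in the common normal form: no violating cell in the region and exactly one '.' -> 'O'
lemma pvB_form (nb pb : List (List String)) :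
    is_valid_human_move_py_alt nb pb =
      (!(pvZ nb pb).any pvViol && decide ((pvZ nb pb).count (".", "O") = 1)) := by
  show (let tally := pvTally nb pb;
    if tally.keys.any (fun p => (p.1 != "." && p.2 != p.1) || (p.1 == "." && p.2 == "X")) then false
    else decide (tally.getD (".", "O") 0 = 1)) = _
  simp only []
  rw [pvTally_eq, PySem.Dict.keys_counter, pvAny_ofList, PySem.Dict.getD_counter]
  have hv : (fun p : String × String => (p.1 != "." && p.2 != p.1) || (p.1 == "." && p.2 == "X")) = pvViol := rfl
  rw [hv]
  cases h : (pvZ nb pb).any pvViol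
  · simp
  · simp

-- A as a predicate on any cell list
lemma pvA_eq (nb pb : List (List String)) :
    is_valid_human_move_py nb pb =
      (!(pvL nb pb).any pvViol && decide ((pvL nb pb).count (".", "O") = 1)) := by
  have hA : is_valid_human_move_py nb pb =
      match pvFoldA (pvL nb pb) 0 with | none => false | some k => decide (k = 1) := by
    simp only [is_valid_human_move_py, pvRange3, pvAOuter_eq, pvL]
  rw [hA, pvFoldA_spec]
  by_cases h : (pvL nb pb).any pvViol
  · simp [h]
  · have he : (0 + ((pvL nb pb).count (".", "O") : Int) = 1) ↔ ((pvL nb pb).count (".", "O") = 1) := by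
      omega
    simp [h, he]

-- pvL in map form
lemma pvCell_nonneg (b : List (List String)) (r c : Int) (hr : 0 ≤ r) (hc : 0 ≤ c) :
    pvCell b r c = (b.getD r.toNat []).getD c.toNat "" := by
  have e1 := PySem.List.pyGet?_of_nonneg (xs := b) (i := r) hr
  have e2 := PySem.List.pyGet?_of_nonneg (xs := b[r.toNat]?.getD []) (i := c) hc
  rw [pvCell, e1, List.getD_eq_getElem?_getD, List.getD_eq_getElem?_getD, e2]

lemma pvL_eq_map (nb pb : List (List String)) :
    pvL nb pb = pvIdx9.map (fun rc => pvPairAt nb pb rc) := by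
  simp [pvL, pvIdx9, pvPairAt, pvCell_nonneg]

-- shape facts from full readability
lemma pvShape_of_read (b : List (List String))
    (h : ∀ rc ∈ pvIdx9, pvReadN b rc = true) :
    2 < b.length ∧ (∀ r ∈ ([0,1,2] : List Nat), 2 < (b.getD r []).length) := by
  have h02 := h (0,2) (by simp [pvIdx9])
  have h12 := h (1,2) (by simp [pvIdx9])
  have h22 := h (2,2) (by simp [pvIdx9])
  simp only [pvReadN, Option.isSome_iff_ne_none, ne_eq, List.getElem?_eq_none_iff, not_le] at h02 h12 h22
  refine ⟨?_, ?_⟩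
  · by_contra hlen
    push_neg at hlen
    rw [List.getD_eq_default _ _ (by omega : b.length ≤ 2)] at h22
    simp at h22
  · intro r hr
    fin_cases hr <;> assumption

-- under full readability the two traversals see the same cells
lemma pvZ_eq_pvL (nb pb : List (List String))
    (h : ∀ rc ∈ pvIdx9, pvReadN nb rc = true ∧ pvReadN pb rc = true) :
    pvZ nb pb = pvL nb pb := by
  obtain ⟨hn, hnr⟩ := pvShape_of_read nb (fun rc hrc => (h rc hrc).1)
  obtain ⟨hp, hpr⟩ := pvShape_of_read pb (fun rc hrc => (h rc hrc).2)
  have en0 : 2 < (nb.getD 0 []).length := hnr 0 (by simp)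
  have en1 : 2 < (nb.getD 1 []).length := hnr 1 (by simp)
  have en2 : 2 < (nb.getD 2 []).length := hnr 2 (by simp)
  have ep0 : 2 < (pb.getD 0 []).length := hpr 0 (by simp)
  have ep1 : 2 < (pb.getD 1 []).length := hpr 1 (by simp)
  have ep2 : 2 < (pb.getD 2 []).length := hpr 2 (by simp)
  clear h hnr hpr
  rcases nb with _ | ⟨n0, _ | ⟨n1, _ | ⟨n2, nt⟩⟩⟩ <;> try simp at hn
  rcases pb with _ | ⟨p0, _ | ⟨p1, _ | ⟨p2, pt⟩⟩⟩ <;> try simp at hp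
  simp only [List.getD_cons_zero, List.getD_cons_succ] at en0 en1 en2 ep0 ep1 ep2
  rcases n0 with _ | ⟨a0, _ | ⟨a1, _ | ⟨a2, ta⟩⟩⟩ <;> try simp at en0
  rcases n1 with _ | ⟨b0, _ | ⟨b1, _ | ⟨b2, tb⟩⟩⟩ <;> try simp at en1
  rcases n2 with _ | ⟨c0, _ | ⟨c1, _ | ⟨c2, tc⟩⟩⟩ <;> try simp at en2
  rcases p0 with _ | ⟨d0, _ | ⟨d1, _ | ⟨d2, td⟩⟩⟩ <;> try simp at ep0
  rcases p1 with _ | ⟨e0, _ | ⟨e1, _ | ⟨e2, te⟩⟩⟩ <;> try simp at ep1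
  rcases p2 with _ | ⟨f0, _ | ⟨f1, _ | ⟨f2, tf⟩⟩⟩ <;> try simp at ep2
  rw [pvL_eq_map]
  simp [pvZ, pvPairAt, pvIdx9, List.getD_eq_getElem?_getD]

-- a readable cell of the 3x3 region lies in B's traversal
lemma pvMemZ (nb pb : List (List String)) (r c : Nat) (hr3 : r < 3) (hc3 : c < 3)
    (h3 : pvReadN nb (r, c) = true) (h4 : pvReadN pb (r, c) = true) :
    ((pb.getD r []).getD c "", (nb.getD r []).getD c "") ∈ pvZ nb pb := by
  have hcn : c < (nb.getD r []).length := by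
    simpa [pvReadN, Option.isSome_iff_ne_none, List.getElem?_eq_none_iff, not_le] using h3
  have hcp : c < (pb.getD r []).length := by
    simpa [pvReadN, Option.isSome_iff_ne_none, List.getElem?_eq_none_iff, not_le] using h4
  have hrn : r < nb.length := by
    by_contra hx
    push_neg at hx
    rw [List.getD_eq_default _ _ hx] at hcn
    simp at hcn
  have hrp : r < pb.length := by
    by_contra hx
    push_neg at hx
    rw [List.getD_eq_default _ _ hx] at hcp
    simp at hcp
  simp only [List.getD_eq_getElem?_getD] at hcn hcp ⊢
  unfold pvZ
  apply List.mem_flatMap.mpr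
  refine ⟨(pb[r]?.getD [], nb[r]?.getD []), ?_, ?_⟩
  · have hlen : r < ((pb.take 3).zip (nb.take 3)).length := by
      simp only [List.length_zip, List.length_take]
      omega
    have he : ((pb.take 3).zip (nb.take 3))[r] = (pb[r]?.getD [], nb[r]?.getD []) := by
      simp [List.getElem_zip, List.getElem_take, List.getElem?_eq_getElem, hrn, hrp]
    exact he ▸ List.getElem_mem hlen
  · have hlen : c < (((pb[r]?.getD []).take 3).zip ((nb[r]?.getD []).take 3)).length := by
      simp only [List.length_zip, List.length_take]
      omega
    have he : (((pb[r]?.getD []).take 3).zip ((nb[r]?.getD []).take 3))[c]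
        = ((pb[r]?.getD [])[c]?.getD "", (nb[r]?.getD [])[c]?.getD "") := by
      simp [List.getElem_zip, List.getElem_take, List.getElem?_eq_getElem, hcn, hcp]
    exact he ▸ List.getElem_mem hlen

-- a violating readable cell makes both sides false
lemma pvViol_mem_pvZ (nb pb : List (List String)) (i : Nat) (hi : i < 9)
    (hr : ∀ j ∈ List.range 9, j ≤ i →
        pvReadN nb (pvIdx9.getD j (0,0)) = true ∧ pvReadN pb (pvIdx9.getD j (0,0)) = true) :
    pvPairAt nb pb (pvIdx9.getD i (0,0)) ∈ pvZ nb pb := by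
  have hri := hr i (by simpa using hi) (le_refl i)
  interval_cases i
  · exact pvMemZ nb pb 0 0 (by omega) (by omega) hri.1 hri.2
  · exact pvMemZ nb pb 0 1 (by omega) (by omega) hri.1 hri.2
  · exact pvMemZ nb pb 0 2 (by omega) (by omega) hri.1 hri.2
  · exact pvMemZ nb pb 1 0 (by omega) (by omega) hri.1 hri.2
  · exact pvMemZ nb pb 1 1 (by omega) (by omega) hri.1 hri.2
  · exact pvMemZ nb pb 1 2 (by omega) (by omega) hri.1 hri.2
  · exact pvMemZ nb pb 2 0 (by omega) (by omega) hri.1 hri.2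
  · exact pvMemZ nb pb 2 1 (by omega) (by omega) hri.1 hri.2
  · exact pvMemZ nb pb 2 2 (by omega) (by omega) hri.1 hri.2

theorem pv_main (nb pb : List (List String))
    (hpre : Pre_is_valid_human_move_py nb pb) :
    is_valid_human_move_py nb pb = is_valid_human_move_py_alt nb pb := by
  rw [pvA_eq, pvB_form]
  rcases hpre with h | ⟨i, hi, hr, hv⟩
  · rw [pvZ_eq_pvL nb pb h]
  · -- both sides have a violating element
    simp only [List.mem_range] at hi
    have hmemL : pvPairAt nb pb (pvIdx9.getD i (0,0)) ∈ pvL nb pb := by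
      rw [pvL_eq_map]
      exact List.mem_map_of_mem (by
        have hlen : i < pvIdx9.length := by simp [pvIdx9]; omega
        rw [List.getD_eq_getElem _ _ hlen]
        exact List.getElem_mem hlen)
    have hmemZ := pvViol_mem_pvZ nb pb i hi hr
    have hAany : (pvL nb pb).any pvViol = true :=
      List.any_eq_true.mpr ⟨_, hmemL, hv⟩
    have hBany : (pvZ nb pb).any pvViol = true :=
      List.any_eq_true.mpr ⟨_, hmemZ, hv⟩
    rw [hAany, hBany]
    simp

-- ===== VERDICT (by name: the statement is the Claim_ definition above) =====
theorem is_valid_human_move_py_spec : Claim_equal_is_valid_human_move_py := by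
  intro nb pb _ hpre
  unfold Spec_is_valid_human_move_py
  exact pv_main nb pb hpre
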